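-- pv_equiv track=rewrite | github.com/rkthomps/coq-modeling | src/util/vector_db_utils.py | group_idxs
-- ===== SOURCE A (Python) =====
-- def group_idxs(idxs: list[int], page_size: int) -> dict[int, list[tuple[int, int]]]:
--     page_idxs: dict[int, list[tuple[int, int]]] = {}
--     for i, idx in enumerate(idxs):
--         page_idx = idx // page_size
--         if page_idx not in page_idxs:
--             page_idxs[page_idx] = []
--         page_idxs[page_idx].append((idx, i))  # vector idx, orig idx
--     return page_idxs
-- ===== SOURCE B (Python) =====
-- def group_idxs(idxs: list[int], page_size: int) -> dict[int, list[tuple[int, int]]]: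
--     keys = list(dict.fromkeys(idx // page_size for idx in idxs))
--     pos = {q: j for j, q in enumerate(keys)}
--     buckets = [[] for _ in keys]
--     for i, idx in enumerate(idxs):
--         buckets[pos[idx // page_size]].append((idx, i))
--     return dict(zip(keys, buckets))
-- ===== Notes on version B (the rewrite author's own statement) =====
-- stated objective: alternative
-- what changed: Replaces A's single pass over a dict of growing lists (membership test + in-place append per element) by a three-phase construction: dedup the bucket keys, build a key-to-position index, fill a positional list of buckets with an unconditional append pass, and zip keys with buckets at the end.
import Mathlib
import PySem

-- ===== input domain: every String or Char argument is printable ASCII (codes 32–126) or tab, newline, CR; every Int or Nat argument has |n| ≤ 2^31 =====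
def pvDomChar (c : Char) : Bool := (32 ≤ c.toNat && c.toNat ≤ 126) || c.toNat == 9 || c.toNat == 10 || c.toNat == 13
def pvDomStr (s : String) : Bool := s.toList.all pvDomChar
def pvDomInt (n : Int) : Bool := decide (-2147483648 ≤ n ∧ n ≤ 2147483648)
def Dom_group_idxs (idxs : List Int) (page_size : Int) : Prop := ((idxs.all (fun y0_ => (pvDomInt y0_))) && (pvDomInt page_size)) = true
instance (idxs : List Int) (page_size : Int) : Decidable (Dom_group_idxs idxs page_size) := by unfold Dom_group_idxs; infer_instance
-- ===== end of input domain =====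

-- B builds the grouping in three phases (dedup bucket keys, key->position index, positional buckets
-- filled by an unconditional append pass, then zip) instead of A's single mutating-dict pass;
-- same return value wherever A returns (page_size ≠ 0 or idxs empty).


-- ===== PORT A =====
-- literal port of A: one pass over enumerate(idxs); 'if page_idx not in page_idxs: page_idxs[page_idx] = []'
-- then append to the bucket's list (modify with default [], the key being guaranteed present).
def group_idxs (idxs : List Int) (page_size : Int) : List (Int × List (Int × Int)) :=
  ((PySem.List.enumerate idxs 0).foldl
    (fun d p =>
      let page_idx := PySem.Int.floordiv p.2 page_size
      let d' := if d.contains page_idx then d else d.insert page_idx []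
      d'.modify page_idx [] (fun l => l ++ [(p.2, p.1)]))
    PySem.Dict.empty).items

-- ===== PORT B =====
-- literal port of B: dedup the keys; pos = {q: j for j, q in enumerate(keys)}; positional buckets
-- filled by one fold; dict(zip(keys, buckets)) is the zip (keys are distinct, insertion order = keys order).
-- pos[...] is ported as getD with default 0: the key is always present, so the default is never used.
def group_idxs_alt (idxs : List Int) (page_size : Int) : List (Int × List (Int × Int)) :=
  let keys := PySem.List.dedup (idxs.map (fun idx => PySem.Int.floordiv idx page_size))
  let pos : PySem.Dict Int Int :=
    (PySem.List.enumerate keys 0).foldl (fun d p => d.insert p.2 p.1) PySem.Dict.empty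
  let buckets := (PySem.List.enumerate idxs 0).foldl
    (fun bs p =>
      let t := pos.getD (PySem.Int.floordiv p.2 page_size) 0
      PySem.List.pySetD bs t (PySem.List.pyGetD bs t [] ++ [(p.2, p.1)]))
    (keys.map (fun _ => ([] : List (Int × Int))))
  keys.zip buckets

-- ===== PRECONDITION & SPEC =====
-- Pre_ excludes exactly page_size = 0 with a nonempty idxs, where the Python A raises ZeroDivisionError.
def Pre_group_idxs (idxs : List Int) (page_size : Int) : Prop := idxs = [] ∨ page_size ≠ 0
instance (idxs : List Int) (page_size : Int) : Decidable (Pre_group_idxs idxs page_size) := by unfold Pre_group_idxs; infer_instance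
def pvWitness_group_idxs : List Int × Int := ([1, 2, 3, -4, 2], 2)

def Spec_group_idxs (idxs : List Int) (page_size : Int) (out : List (Int × List (Int × Int))) : Prop := out = group_idxs_alt idxs page_size
instance (idxs : List Int) (page_size : Int) (out : List (Int × List (Int × Int))) : Decidable (Spec_group_idxs idxs page_size out) := by unfold Spec_group_idxs; infer_instance

-- ===== CLAIM (what is proved, stated in full; the proofs are below) =====
def Claim_equal_group_idxs : Prop := ∀ (idxs : List Int) (page_size : Int), Dom_group_idxs idxs page_size → Pre_group_idxs idxs page_size → Spec_group_idxs idxs page_size (group_idxs idxs page_size)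

-- ===== LEMMAS AND PROOFS =====

-- The common canonical form both ports are reduced to: each deduped key paired with
-- the filtered, order-preserving sublist of (idx, i) pairs that fall in its bucket.
def pvCanon (idxs : List Int) (page_size : Int) : List (Int × List (Int × Int)) :=
  (PySem.List.dedup (idxs.map (fun idx => PySem.Int.floordiv idx page_size))).map (fun q =>
    (q, ((PySem.List.enumerate idxs 0).filter
          (fun p => PySem.Int.floordiv p.2 page_size == q)).map (fun p => (p.2, p.1))))

-- A's "ensure key then append" step is one modify with default [].
lemma ensure_modify_eq_modify (d : PySem.Dict Int (List (Int × Int))) (q : Int) (v : Int × Int) :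
    (if d.contains q then d else d.insert q []).modify q [] (fun l => l ++ [v])
      = d.modify q [] (fun l => l ++ [v]) := by
  by_cases h : d.contains q
  · simp [h]
  · simp only [Bool.not_eq_true] at h
    simp [h, PySem.Dict.modify, PySem.Dict.insert_insert_self,
      PySem.Dict.getD_insert_self, PySem.Dict.getD_of_not_contains d [] h]

lemma map_key_enumerate (idxs : List Int) (page_size : Int) :
    (PySem.List.enumerate idxs 0).map (fun p => PySem.Int.floordiv p.2 page_size)
      = idxs.map (fun idx => PySem.Int.floordiv idx page_size) := by
  conv_rhs => rw [← PySem.List.map_snd_enumerate idxs 0]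
  rw [List.map_map]
  rfl

-- A equals the canonical form.
lemma groupA_eq_canon (idxs : List Int) (page_size : Int) :
    group_idxs idxs page_size = pvCanon idxs page_size := by
  unfold group_idxs pvCanon
  rw [show (PySem.List.enumerate idxs 0).foldl
      (fun d p =>
        let page_idx := PySem.Int.floordiv p.2 page_size
        let d' := if d.contains page_idx then d else d.insert page_idx []
        d'.modify page_idx [] (fun l => l ++ [(p.2, p.1)]))
      PySem.Dict.empty
    = ((PySem.List.enumerate idxs 0).map
        (fun p => (PySem.Int.floordiv p.2 page_size, (p.2, p.1)))).foldl
        (fun d r => d.modify r.1 [] (fun l => l ++ [r.2])) PySem.Dict.empty from by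
      rw [List.foldl_map]
      apply PySem.List.foldl_congr_mem
      intro d p _
      exact ensure_modify_eq_modify d _ _]
  set l := (PySem.List.enumerate idxs 0).map
      (fun p => (PySem.Int.floordiv p.2 page_size, (p.2, p.1))) with hl
  have hnodup : ((l.foldl (fun d r => d.modify r.1 [] (fun v => v ++ [r.2]))
      PySem.Dict.empty)).keys.Nodup :=
    PySem.Dict.nodup_keys_foldl_modify_key l (fun r => r.1) [] (fun _ r => fun v => v ++ [r.2])
      PySem.Dict.empty (by simp [PySem.Dict.keys_empty])
  rw [PySem.Dict.items_eq_map_keys _ hnodup []]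
  have hkeys : ((l.foldl (fun d r => d.modify r.1 [] (fun v => v ++ [r.2]))
      PySem.Dict.empty)).keys
      = PySem.List.dedup (idxs.map (fun idx => PySem.Int.floordiv idx page_size)) := by
    rw [PySem.Dict.keys_foldl_modify_key l (fun r => r.1) [] (fun _ r => fun v => v ++ [r.2])
      PySem.Dict.empty, PySem.Dict.keys_empty, PySem.List.dedup_eq_ofList]
    show PySem.Set.update [] (l.map (fun r => r.1)) = _
    rw [hl, List.map_map]
    rw [show ((PySem.List.enumerate idxs 0).map
        ((fun r : Int × (Int × Int) => r.1) ∘ (fun p : Int × Int => (PySem.Int.floordiv p.2 page_size, (p.2, p.1)))))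
        = idxs.map (fun idx => PySem.Int.floordiv idx page_size) from map_key_enumerate idxs page_size]
    rfl
  rw [hkeys]
  apply List.map_congr_left
  intro q _
  rw [PySem.Dict.getD_foldl_modify_append l PySem.Dict.empty q]
  rw [PySem.Dict.getD_empty, List.nil_append, hl, List.filter_map, List.map_map]
  rfl

-- an insert-fold over enumerate leaves keys it never touches alone
lemma getD_posfold_of_not_mem (tl : List Int) (s : Int) (d : PySem.Dict Int Int)
    (x : Int) (hx : x ∉ tl) :
    ((PySem.List.enumerate tl s).foldl (fun d p => d.insert p.2 p.1) d).getD x 0 = d.getD x 0 := by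
  induction tl generalizing s d with
  | nil => simp [PySem.List.enumerate_nil]
  | cons y tl ih =>
    have hxy : x ≠ y := fun h => hx (by rw [h]; exact List.mem_cons_self)
    rw [PySem.List.enumerate_cons, List.foldl_cons]
    rw [ih (s + 1) _ (fun h => hx (List.mem_cons_of_mem y h))]
    exact PySem.Dict.getD_insert_of_ne _ _ _ hxy

-- the pos dict maps the j-th key to s + j
lemma getD_posfold (ks : List Int) (hnd : ks.Nodup) (s : Int) (d : PySem.Dict Int Int)
    (j : Nat) (hj : j < ks.length) :
    ((PySem.List.enumerate ks s).foldl (fun d p => d.insert p.2 p.1) d).getD ks[j] 0 = s + j := by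
  induction ks generalizing s d j with
  | nil => simp at hj
  | cons k tl ih =>
    rw [PySem.List.enumerate_cons, List.foldl_cons]
    rcases j with _ | j
    · simp only [List.getElem_cons_zero]
      rw [getD_posfold_of_not_mem tl (s + 1) _ k (by simp at hnd; exact hnd.1)]
      simp [PySem.Dict.getD_insert_self]
    · simp only [List.getElem_cons_succ]
      rw [ih (List.Nodup.of_cons hnd) (s + 1) _ j (by simpa using hj)]
      push_cast
      ring

-- the bucket-filling fold keeps the length, and res[j] collects, in order,
-- the pairs whose bucket is ks[j]
lemma bucket_fold (page_size : Int) (ks : List Int) (hnd : ks.Nodup)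
    (pos : PySem.Dict Int Int)
    (hpos : ∀ (j : Nat) (hj : j < ks.length), pos.getD ks[j] 0 = (j : Int))
    (l : List (Int × Int)) (bs : List (List (Int × Int)))
    (hlen : bs.length = ks.length)
    (hmem : ∀ p ∈ l, PySem.Int.floordiv p.2 page_size ∈ ks) :
    (l.foldl
        (fun bs p =>
          let t := pos.getD (PySem.Int.floordiv p.2 page_size) 0
          PySem.List.pySetD bs t (PySem.List.pyGetD bs t [] ++ [(p.2, p.1)])) bs).length
        = ks.length ∧
    ∀ (j : Nat) (hj : j < ks.length),
      (l.foldl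
        (fun bs p =>
          let t := pos.getD (PySem.Int.floordiv p.2 page_size) 0
          PySem.List.pySetD bs t (PySem.List.pyGetD bs t [] ++ [(p.2, p.1)])) bs).getD j []
        = bs.getD j []
          ++ (l.filter (fun p => PySem.Int.floordiv p.2 page_size == ks[j])).map
              (fun p => (p.2, p.1)) := by
  induction l generalizing bs with
  | nil => simp [hlen]
  | cons p l ih =>
    have hkp : PySem.Int.floordiv p.2 page_size ∈ ks := hmem p List.mem_cons_self
    obtain ⟨j0, hj0, hkeq⟩ := List.mem_iff_getElem.mp hkp
    have hposp : pos.getD (PySem.Int.floordiv p.2 page_size) 0 = (j0 : Int) := by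
      rw [← hkeq]; exact hpos j0 hj0
    simp only [List.foldl_cons, hposp, PySem.List.pySetD_natCast, PySem.List.pyGetD_natCast]
    have hlen' : (bs.set j0 (bs.getD j0 [] ++ [(p.2, p.1)])).length = ks.length := by
      simp [hlen]
    obtain ⟨ihlen, ihget⟩ := ih _ hlen' (fun q hq => hmem q (List.mem_cons_of_mem p hq))
    refine ⟨ihlen, fun j hj => ?_⟩
    rw [ihget j hj]
    have hjbs : j < bs.length := hlen ▸ hj
    by_cases hjj : j = j0
    · subst hjj
      have hset : (bs.set j (bs.getD j [] ++ [(p.2, p.1)])).getD j []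
          = bs.getD j [] ++ [(p.2, p.1)] := by
        rw [List.getD_eq_getElem _ _ (by simpa using hjbs), List.getElem_set_self]
      have hfilt : (PySem.Int.floordiv p.2 page_size == ks[j]) = true := by
        rw [← hkeq]; exact beq_self_eq_true _
      rw [hset]
      simp [hfilt, List.append_assoc]
    · have hset : (bs.set j0 (bs.getD j0 [] ++ [(p.2, p.1)])).getD j [] = bs.getD j [] := by
        rw [List.getD_eq_getElem _ _ (by simpa using hjbs),
          List.getElem_set_ne (fun h => hjj h.symm),
          List.getD_eq_getElem _ _ hjbs]
      have hfilt : (PySem.Int.floordiv p.2 page_size == ks[j]) = false := by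
        rw [← hkeq]
        simp only [beq_eq_false_iff_ne, ne_eq]
        intro h
        exact hjj (((hnd.getElem_inj_iff).mp h).symm)
      rw [hset]
      simp [hfilt]

-- B equals the canonical form.
lemma groupB_eq_canon (idxs : List Int) (page_size : Int) :
    group_idxs_alt idxs page_size = pvCanon idxs page_size := by
  unfold group_idxs_alt pvCanon
  set ks := PySem.List.dedup (idxs.map (fun idx => PySem.Int.floordiv idx page_size)) with hks
  have hnd : ks.Nodup := PySem.List.nodup_dedup _
  set pos := (PySem.List.enumerate ks 0).foldl (fun d p => d.insert p.2 p.1) PySem.Dict.empty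
    with hposdef
  have hpos : ∀ (j : Nat) (hj : j < ks.length), pos.getD ks[j] 0 = (j : Int) := by
    intro j hj
    rw [hposdef, getD_posfold ks hnd 0 PySem.Dict.empty j hj, zero_add]
  have hmem : ∀ p ∈ PySem.List.enumerate idxs 0, PySem.Int.floordiv p.2 page_size ∈ ks := by
    intro p hp
    obtain ⟨k, hk, hpeq⟩ := (PySem.List.mem_enumerate_iff idxs 0 p).mp hp
    rw [hks, PySem.List.mem_dedup]
    exact List.mem_map.mpr ⟨idxs[k], List.getElem_mem hk, by rw [hpeq]⟩
  obtain ⟨hlen, hget⟩ := bucket_fold page_size ks hnd pos hpos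
    (PySem.List.enumerate idxs 0) (ks.map (fun _ => ([] : List (Int × Int))))
    (by simp) hmem
  apply List.ext_getElem (by rw [List.length_zip, hlen, List.length_map, Nat.min_self])
  intro j hj1 hj2
  have hjk : j < ks.length := by simpa using hj2
  rw [List.getElem_zip, List.getElem_map]
  refine Prod.ext rfl ?_
  show _ = ((PySem.List.enumerate idxs 0).filter
      (fun p => PySem.Int.floordiv p.2 page_size == ks[j])).map (fun p => (p.2, p.1))
  rw [← List.getD_eq_getElem _ ([] : List (Int × Int)) (by rw [hlen]; exact hjk),
    hget j hjk,
    List.getD_eq_getElem _ _ (by simpa using hjk), List.getElem_map, List.nil_append]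

-- ===== VERDICT (by name: the statement is the Claim_ definition above) =====
theorem group_idxs_spec : Claim_equal_group_idxs := by
  intro idxs page_size _ _
  unfold Spec_group_idxs
  rw [groupA_eq_canon, groupB_eq_canon]
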